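-- pv_equiv track=rewrite | github.com/hy54321/DM_Helper_MCP | server/sql_guard.py | _strip_sql_comments
-- ===== SOURCE A (Python) =====
-- def _strip_sql_comments(sql: str) -> str:
--     """Remove line/block comments while preserving quoted string content."""
--     out: list[str] = []
--     in_single = False
--     in_double = False
--     in_line_comment = False
--     in_block_comment = False
--     i = 0
--
--     while i < len(sql):
--         ch = sql[i]
--         nxt = sql[i + 1] if i + 1 < len(sql) else ""
--
--         if in_line_comment:
--             if ch == "\n":
--                 in_line_comment = False
--                 out.append(ch)
--             i += 1
--             continue
--
--         if in_block_comment: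
--             if ch == "*" and nxt == "/":
--                 in_block_comment = False
--                 i += 2
--                 continue
--             i += 1
--             continue
--
--         if not in_single and not in_double:
--             if ch == "-" and nxt == "-":
--                 in_line_comment = True
--                 i += 2
--                 continue
--             if ch == "/" and nxt == "*":
--                 in_block_comment = True
--                 i += 2
--                 continue
--
--         if ch == "'" and not in_double:
--             # Handle escaped single quote ('')
--             if in_single and nxt == "'":
--                 out.append(ch)
--                 out.append(nxt)
--                 i += 2
--                 continue
--             in_single = not in_single
--             out.append(ch)
--             i += 1
--             continue
--
--         if ch == '"' and not in_single:
--             # Handle escaped double quote ("")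
--             if in_double and nxt == '"':
--                 out.append(ch)
--                 out.append(nxt)
--                 i += 2
--                 continue
--             in_double = not in_double
--             out.append(ch)
--             i += 1
--             continue
--
--         out.append(ch)
--         i += 1
--
--     return "".join(out)
-- ===== SOURCE B (Python) =====
-- def _scan_quoted(sql: str, i: int, q: str) -> int:
--     """Return the index just past the closing quote (doubled quotes stay inside)."""
--     n = len(sql)
--     while i < n:
--         if sql[i] == q:
--             if i + 1 < n and sql[i + 1] == q:
--                 i += 2
--             else:
--                 return i + 1
--         else:
--             i += 1
--     return i
--
--
-- def _strip_sql_comments(sql: str) -> str: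
--     """Remove line/block comments while preserving quoted string content."""
--     out: list[str] = []
--     n = len(sql)
--     i = 0
--     while i < n:
--         ch = sql[i]
--         if ch == "'" or ch == '"':
--             j = _scan_quoted(sql, i + 1, ch)
--             out.append(sql[i:j])
--             i = j
--         elif ch == "-" and i + 1 < n and sql[i + 1] == "-":
--             j = sql.find("\n", i + 2)
--             if j < 0:
--                 break
--             out.append("\n")
--             i = j + 1
--         elif ch == "/" and i + 1 < n and sql[i + 1] == "*":
--             j = sql.find("*/", i + 2)
--             i = n if j < 0 else j + 2
--         else:
--             out.append(ch)
--             i += 1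
--     return "".join(out)
-- ===== Notes on version B (the rewrite author's own statement) =====
-- stated objective: idiomatic
-- what changed: A's character-by-character state machine with four mode booleans is replaced by a token-level scanner: a helper consumes an entire quoted literal (handling doubled-quote escapes), and line/block comments are skipped in one step with str.find, so the main loop carries no mode state.
import Mathlib
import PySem

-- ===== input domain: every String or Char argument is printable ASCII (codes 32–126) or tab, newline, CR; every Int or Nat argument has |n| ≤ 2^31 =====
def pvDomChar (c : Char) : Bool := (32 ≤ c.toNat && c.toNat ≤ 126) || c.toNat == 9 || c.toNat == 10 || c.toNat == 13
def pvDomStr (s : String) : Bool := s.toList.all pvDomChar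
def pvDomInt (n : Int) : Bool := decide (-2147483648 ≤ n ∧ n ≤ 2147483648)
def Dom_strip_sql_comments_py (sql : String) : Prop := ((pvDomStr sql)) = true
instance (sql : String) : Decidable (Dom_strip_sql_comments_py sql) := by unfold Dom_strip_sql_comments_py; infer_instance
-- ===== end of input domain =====

-- B replaces A's five-flag character-by-character state machine by a token-level scanner
-- (whole quoted strings / comments consumed by dedicated helpers); objective: simpler/idiomatic.

-- ===== PORT A =====
-- A's while-loop, transliterated as recursion over the character list; the four booleans
-- are A's in_single/in_double/in_line_comment/in_block_comment, rest.head? is Python's nxt.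
def pvGoA (cs : List Char) (inS inD inL inB : Bool) : List Char :=
  match cs with
  | [] => []
  | ch :: rest =>
    if inL then
      (if ch = '\n' then '\n' :: pvGoA rest inS inD false inB else pvGoA rest inS inD inL inB)
    else if inB then
      (if ch = '*' ∧ rest.head? = some '/' then pvGoA rest.tail inS inD inL false
       else pvGoA rest inS inD inL inB)
    else if inS = false ∧ inD = false ∧ ch = '-' ∧ rest.head? = some '-' then
      pvGoA rest.tail inS inD true inB
    else if inS = false ∧ inD = false ∧ ch = '/' ∧ rest.head? = some '*' then
      pvGoA rest.tail inS inD inL true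
    else if ch = '\'' ∧ inD = false then
      (if inS = true ∧ rest.head? = some '\'' then ch :: '\'' :: pvGoA rest.tail inS inD inL inB
       else ch :: pvGoA rest (!inS) inD inL inB)
    else if ch = '"' ∧ inS = false then
      (if inD = true ∧ rest.head? = some '"' then ch :: '"' :: pvGoA rest.tail inS inD inL inB
       else ch :: pvGoA rest inS (!inD) inL inB)
    else ch :: pvGoA rest inS inD inL inB
termination_by cs.length
decreasing_by all_goals simp_all [List.length_tail]

def strip_sql_comments_py (sql : String) : String :=
  String.ofList (pvGoA sql.toList false false false false)

-- ===== PORT B =====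
-- _scan_quoted: consume a quoted literal body (after the opening quote); returns the
-- consumed token and the remaining suffix (Source B returns the index past the token).
def pvTakeQuoted (q : Char) (cs : List Char) : List Char × List Char :=
  match cs with
  | [] => ([], [])
  | c :: rest =>
    if c = q then
      match rest with
      | c2 :: rest2 =>
        if c2 = q then
          (c :: c2 :: (pvTakeQuoted q rest2).1, (pvTakeQuoted q rest2).2)
        else ([c], rest)
      | [] => ([c], [])
    else
      (c :: (pvTakeQuoted q rest).1, (pvTakeQuoted q rest).2)
termination_by cs.length
decreasing_by all_goals simp

theorem pvTakeQuoted_len (q : Char) (cs : List Char) : (pvTakeQuoted q cs).2.length ≤ cs.length := by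
  fun_induction pvTakeQuoted q cs <;> simp_all <;> omega

mutual
-- main loop of Source B
def pvGoB (cs : List Char) : List Char :=
  match cs with
  | [] => []
  | c :: rest =>
    if c = '\'' ∨ c = '"' then
      c :: (pvTakeQuoted c rest).1 ++ pvGoB (pvTakeQuoted c rest).2
    else if c = '-' ∧ rest.head? = some '-' then pvLineB rest.tail
    else if c = '/' ∧ rest.head? = some '*' then pvBlockB rest.tail
    else c :: pvGoB rest
termination_by cs.length
decreasing_by
  all_goals simp_all [List.length_tail] <;> try omega
  have := pvTakeQuoted_len c rest; omega
-- sql.find("\n", i+2): skip to the newline, keep it (or drop everything if none)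
def pvLineB (cs : List Char) : List Char :=
  match cs with
  | [] => []
  | c :: rest => if c = '\n' then '\n' :: pvGoB rest else pvLineB rest
termination_by cs.length
decreasing_by all_goals simp_all
-- sql.find("*/", i+2): skip past the terminator (or drop everything if none)
def pvBlockB (cs : List Char) : List Char :=
  match cs with
  | [] => []
  | c :: rest =>
    if c = '*' ∧ rest.head? = some '/' then pvGoB rest.tail else pvBlockB rest
termination_by cs.length
decreasing_by all_goals simp_all [List.length_tail]
end

def strip_sql_comments_py_alt (sql : String) : String :=
  String.ofList (pvGoB sql.toList)

-- ===== PRECONDITION & SPEC =====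
def Spec_strip_sql_comments_py (sql : String) (out : String) : Prop := out = strip_sql_comments_py_alt sql
instance (sql : String) (out : String) : Decidable (Spec_strip_sql_comments_py sql out) := by unfold Spec_strip_sql_comments_py; infer_instance

-- ===== CLAIM (what is proved, stated in full; the proofs are below) =====
def Claim_equal_strip_sql_comments_py : Prop := ∀ (sql : String), Dom_strip_sql_comments_py sql → Spec_strip_sql_comments_py sql (strip_sql_comments_py sql)

-- ===== LEMMAS AND PROOFS =====

-- The five reachable states of A's machine, matched against B's token scanners,
-- by one strong induction on the length of the suffix.

-- one step of each machine state on a suffix with at least two characters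
theorem pvStepMain (c c2 : Char) (rest2 : List Char)
    (H1a : pvGoA (c2 :: rest2) false false false false = pvGoB (c2 :: rest2))
    (H2b : pvGoA rest2 false false true false = pvLineB rest2)
    (H2c : pvGoA rest2 false false false true = pvBlockB rest2)
    (H1d : pvGoA (c2 :: rest2) true false false false =
      (pvTakeQuoted '\'' (c2 :: rest2)).1 ++ pvGoB (pvTakeQuoted '\'' (c2 :: rest2)).2)
    (H1e : pvGoA (c2 :: rest2) false true false false =
      (pvTakeQuoted '"' (c2 :: rest2)).1 ++ pvGoB (pvTakeQuoted '"' (c2 :: rest2)).2) :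
    pvGoA (c :: c2 :: rest2) false false false false = pvGoB (c :: c2 :: rest2) := by
  rw [pvGoA.eq_def, pvGoB.eq_def]
  simp only [List.head?_cons, List.tail_cons]
  split_ifs <;> simp_all

theorem pvStepLine (c c2 : Char) (rest2 : List Char)
    (H1a : pvGoA (c2 :: rest2) false false false false = pvGoB (c2 :: rest2))
    (H1b : pvGoA (c2 :: rest2) false false true false = pvLineB (c2 :: rest2)) :
    pvGoA (c :: c2 :: rest2) false false true false = pvLineB (c :: c2 :: rest2) := by
  rw [pvGoA.eq_def, pvLineB.eq_def]
  simp only [List.head?_cons, List.tail_cons]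
  split_ifs <;> simp_all

theorem pvStepBlock (c c2 : Char) (rest2 : List Char)
    (H2a : pvGoA rest2 false false false false = pvGoB rest2)
    (H1c : pvGoA (c2 :: rest2) false false false true = pvBlockB (c2 :: rest2)) :
    pvGoA (c :: c2 :: rest2) false false false true = pvBlockB (c :: c2 :: rest2) := by
  rw [pvGoA.eq_def, pvBlockB.eq_def]
  simp only [List.head?_cons, List.tail_cons]
  split_ifs <;> simp_all

theorem pvStepSingle (c c2 : Char) (rest2 : List Char)
    (H1a : pvGoA (c2 :: rest2) false false false false = pvGoB (c2 :: rest2))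
    (H2d : pvGoA rest2 true false false false =
      (pvTakeQuoted '\'' rest2).1 ++ pvGoB (pvTakeQuoted '\'' rest2).2)
    (H1d : pvGoA (c2 :: rest2) true false false false =
      (pvTakeQuoted '\'' (c2 :: rest2)).1 ++ pvGoB (pvTakeQuoted '\'' (c2 :: rest2)).2) :
    pvGoA (c :: c2 :: rest2) true false false false =
      (pvTakeQuoted '\'' (c :: c2 :: rest2)).1 ++ pvGoB (pvTakeQuoted '\'' (c :: c2 :: rest2)).2 := by
  rw [pvGoA.eq_def, pvTakeQuoted.eq_def]
  simp only [List.head?_cons, List.tail_cons]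
  split_ifs <;> simp_all

theorem pvStepDouble (c c2 : Char) (rest2 : List Char)
    (H1a : pvGoA (c2 :: rest2) false false false false = pvGoB (c2 :: rest2))
    (H2e : pvGoA rest2 false true false false =
      (pvTakeQuoted '"' rest2).1 ++ pvGoB (pvTakeQuoted '"' rest2).2)
    (H1e : pvGoA (c2 :: rest2) false true false false =
      (pvTakeQuoted '"' (c2 :: rest2)).1 ++ pvGoB (pvTakeQuoted '"' (c2 :: rest2)).2) :
    pvGoA (c :: c2 :: rest2) false true false false =
      (pvTakeQuoted '"' (c :: c2 :: rest2)).1 ++ pvGoB (pvTakeQuoted '"' (c :: c2 :: rest2)).2 := by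
  rw [pvGoA.eq_def, pvTakeQuoted.eq_def]
  simp only [List.head?_cons, List.tail_cons]
  split_ifs <;> simp_all

set_option maxHeartbeats 1000000 in
theorem pvKey : ∀ (n : Nat) (cs : List Char), cs.length ≤ n →
    pvGoA cs false false false false = pvGoB cs ∧
    pvGoA cs false false true false = pvLineB cs ∧
    pvGoA cs false false false true = pvBlockB cs ∧
    pvGoA cs true false false false = (pvTakeQuoted '\'' cs).1 ++ pvGoB (pvTakeQuoted '\'' cs).2 ∧
    pvGoA cs false true false false = (pvTakeQuoted '"' cs).1 ++ pvGoB (pvTakeQuoted '"' cs).2 := by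
  intro n
  induction n with
  | zero =>
    intro cs h
    have : cs = [] := List.length_eq_zero_iff.mp (Nat.le_zero.mp h)
    subst this
    simp [pvGoA, pvGoB, pvLineB, pvBlockB, pvTakeQuoted]
  | succ n ih =>
    intro cs h
    cases cs with
    | nil => simp [pvGoA, pvGoB, pvLineB, pvBlockB, pvTakeQuoted]
    | cons c rest =>
      cases rest with
      | nil =>
        refine ⟨?_, ?_, ?_, ?_, ?_⟩ <;>
          (simp only [pvGoA, pvGoB, pvLineB, pvBlockB, pvTakeQuoted]; split_ifs <;> simp_all [pvGoB])
      | cons c2 rest2 =>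
        have hr : (c2 :: rest2).length ≤ n := by simp at h ⊢; omega
        have hr2 : rest2.length ≤ n := by simp at h; omega
        have H1 := ih (c2 :: rest2) hr
        have H2 := ih rest2 hr2
        obtain ⟨H1a, H1b, H1c, H1d, H1e⟩ := H1
        obtain ⟨H2a, H2b, H2c, H2d, H2e⟩ := H2
        exact ⟨pvStepMain c c2 rest2 H1a H2b H2c H1d H1e,
               pvStepLine c c2 rest2 H1a H1b,
               pvStepBlock c c2 rest2 H2a H1c,
               pvStepSingle c c2 rest2 H1a H2d H1d,
               pvStepDouble c c2 rest2 H1a H2e H1e⟩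

theorem strip_sql_comments_py_spec : Claim_equal_strip_sql_comments_py := by
  intro sql _
  unfold Spec_strip_sql_comments_py strip_sql_comments_py strip_sql_comments_py_alt
  rw [(pvKey sql.toList.length sql.toList le_rfl).1]
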